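-- pv_equiv track=rewrite | github.com/jdanray/leetcode | findValidElements.py | findValidElements
-- ===== SOURCE A (Python) =====
-- def findValidElements(nums):
-- 	elems = []
-- 	for i, n in enumerate(nums):
-- 		if all(nums[j] < n for j in range(i)):
-- 			elems.append(n)
-- 		elif all(nums[j] < n for j in range(i + 1, len(nums))):
-- 			elems.append(n)
--
-- 	return elems
-- ===== SOURCE B (Python) =====
-- def findValidElements(nums):
--     # O(n): suffix maxima precomputed once, running prefix max in the main pass
--     sufs = []
--     m = None
--     for x in reversed(nums):
--         sufs.append(m)
--         m = x if (m is None or x > m) else m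
--     sufs.reverse()
--     res = []
--     pm = None
--     for x, s in zip(nums, sufs):
--         if (pm is None or x > pm) or (s is None or x > s):
--             res.append(x)
--         pm = x if (pm is None or x > pm) else pm
--     return res
-- ===== Notes on version B (the rewrite author's own statement) =====
-- stated objective: faster
-- what changed: replaced the per-element O(n) all(...) scans with a precomputed suffix-max array and a running prefix max, giving O(1) checks per element
import Mathlib
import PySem

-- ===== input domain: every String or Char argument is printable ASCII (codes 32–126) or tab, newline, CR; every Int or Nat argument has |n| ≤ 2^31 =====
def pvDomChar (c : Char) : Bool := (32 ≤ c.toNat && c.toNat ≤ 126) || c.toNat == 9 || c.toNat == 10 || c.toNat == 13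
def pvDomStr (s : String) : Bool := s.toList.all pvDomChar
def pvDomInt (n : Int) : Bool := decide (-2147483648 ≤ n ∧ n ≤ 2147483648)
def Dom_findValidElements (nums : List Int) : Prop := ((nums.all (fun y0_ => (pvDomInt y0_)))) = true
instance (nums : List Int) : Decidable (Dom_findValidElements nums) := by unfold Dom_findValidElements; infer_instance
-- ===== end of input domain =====

-- B replaces A's per-element scans with a precomputed suffix-max list and a running prefix max (a timing run measures the speed-up).

-- ===== PORT A =====
def findValidElements (nums : List Int) : List Int :=
  (PySem.List.enumerate nums 0).foldl (fun elems p =>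
    if (PySem.List.pyRange 0 p.1 1).all (fun j => decide (PySem.List.pyGetD nums j 0 < p.2)) then
      elems ++ [p.2]
    else if (PySem.List.pyRange (p.1 + 1) (nums.length : Int) 1).all
        (fun j => decide (PySem.List.pyGetD nums j 0 < p.2)) then
      elems ++ [p.2]
    else elems) []

-- ===== PORT B =====
-- "m is None or x > m"
def pvLtO (x : Int) (m : Option Int) : Bool :=
  match m with
  | none => true
  | some mm => decide (x > mm)

-- "x if (m is None or x > m) else m"
def pvStep1 (m : Option Int) (x : Int) : Option Int :=
  if pvLtO x m then some x else m

def findValidElements_alt (nums : List Int) : List Int :=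
  ((nums.zip
      ((nums.reverse.foldl
        (fun (acc : List (Option Int) × Option Int) x => (acc.1 ++ [acc.2], pvStep1 acc.2 x))
        ([], none)).1.reverse)).foldl
    (fun (acc : List Int × Option Int) xs =>
      ((if pvLtO xs.1 acc.2 || pvLtO xs.1 xs.2 then acc.1 ++ [xs.1] else acc.1),
       pvStep1 acc.2 xs.1))
    ([], none)).1

-- ===== PRECONDITION & SPEC =====
def Spec_findValidElements (nums : List Int) (out : List Int) : Prop := out = findValidElements_alt nums
instance (nums : List Int) (out : List Int) : Decidable (Spec_findValidElements nums out) := by unfold Spec_findValidElements; infer_instance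

-- ===== CLAIM (what is proved, stated in full; the proofs are below) =====
def Claim_equal_findValidElements : Prop := ∀ (nums : List Int), Dom_findValidElements nums → Spec_findValidElements nums (findValidElements nums)

-- ===== LEMMAS AND PROOFS =====

-- running max of a list, as both loops of B maintain it
def pvFoldMax (m : Option Int) (l : List Int) : Option Int := l.foldl pvStep1 m

-- canonical recursion both ports are reduced to
def pvCanon (pm : Option Int) : List Int → List Int
  | [] => []
  | x :: t =>
      (if pvLtO x pm || pvLtO x (pvFoldMax none t) then [x] else []) ++ pvCanon (pvStep1 pm x) t

-- the suffix-max list of B, structurally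
def pvSpecS (m : Option Int) : List Int → List (Option Int)
  | [] => []
  | _y :: t => pvFoldMax m t :: pvSpecS m t

theorem pv_all_congr_mem {α : Type} {l : List α} {p q : α → Bool}
    (h : ∀ a ∈ l, p a = q a) : l.all p = l.all q := by
  induction l with
  | nil => rfl
  | cons a t ih =>
      simp only [List.all_cons, h a (List.mem_cons_self ..),
        ih (fun b hb => h b (List.mem_cons_of_mem _ hb))]

theorem pvLtO_step1 (x : Int) (m : Option Int) (y : Int) :
    pvLtO x (pvStep1 m y) = (pvLtO x m && decide (y < x)) := by
  cases m <;> simp [pvLtO, pvStep1] <;> split_ifs <;> simp [pvLtO] <;> omega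

theorem pvLtO_foldMax (l : List Int) (m : Option Int) (x : Int) :
    pvLtO x (pvFoldMax m l) = (pvLtO x m && l.all (fun y => decide (y < x))) := by
  induction l generalizing m with
  | nil => simp [pvFoldMax]
  | cons y t ih =>
      simp only [pvFoldMax, List.foldl_cons, List.all_cons]
      rw [show (t.foldl pvStep1 (pvStep1 m y)) = pvFoldMax (pvStep1 m y) t from rfl, ih,
        pvLtO_step1, Bool.and_assoc]

theorem pvStep1_none (x : Int) : pvStep1 none x = some x := rfl

theorem pvStep1_some (mm x : Int) : pvStep1 (some mm) x = some (max mm x) := by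
  simp only [pvStep1, pvLtO, decide_eq_true_eq]
  split_ifs with h
  · rw [max_eq_right (le_of_lt h)]
  · rw [max_eq_left (by omega)]

theorem pvStep1_comm (m : Option Int) (x y : Int) :
    pvStep1 (pvStep1 m x) y = pvStep1 (pvStep1 m y) x := by
  cases m with
  | none => rw [pvStep1_none, pvStep1_none, pvStep1_some, pvStep1_some, max_comm]
  | some mm =>
      rw [pvStep1_some, pvStep1_some, pvStep1_some, pvStep1_some, max_right_comm]

theorem pvFoldMax_step1 (l : List Int) (m : Option Int) (x : Int) :
    pvFoldMax (pvStep1 m x) l = pvStep1 (pvFoldMax m l) x := by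
  induction l generalizing m with
  | nil => rfl
  | cons y t ih => simp only [pvFoldMax, List.foldl_cons] at *; rw [pvStep1_comm, ih]

theorem pvFoldMax_append (m : Option Int) (l : List Int) (x : Int) :
    pvFoldMax m (l ++ [x]) = pvStep1 (pvFoldMax m l) x := by
  simp [pvFoldMax]

-- specS over a snoc
theorem pvSpecS_snoc (m : Option Int) (l : List Int) (x : Int) :
    pvSpecS m (l ++ [x]) = pvSpecS (pvStep1 m x) l ++ [m] := by
  induction l with
  | nil => simp [pvSpecS, pvFoldMax]
  | cons y t ih =>
      simp only [List.cons_append, pvSpecS, ih, List.cons_append]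
      rw [pvFoldMax_append, pvFoldMax_step1]

-- B's first loop produces pvSpecS
theorem pvB_loop1 (l : List Int) (acc : List (Option Int)) (m : Option Int) :
    (l.reverse.foldl
      (fun (acc : List (Option Int) × Option Int) x => (acc.1 ++ [acc.2], pvStep1 acc.2 x))
      (acc, m)).1 = acc ++ (pvSpecS m l).reverse := by
  induction l using List.reverseRecOn generalizing acc m with
  | nil => simp [pvSpecS]
  | append_singleton t x ih =>
      rw [List.reverse_append, List.reverse_singleton, List.singleton_append, List.foldl_cons, ih,
        pvSpecS_snoc]
      simp

-- B's second loop produces pvCanon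
theorem pvB_loop2 (l : List Int) (acc : List Int) (pm : Option Int) :
    ((l.zip (pvSpecS none l)).foldl
      (fun (acc : List Int × Option Int) (xs : Int × Option Int) =>
        ((if pvLtO xs.1 acc.2 || pvLtO xs.1 xs.2 then acc.1 ++ [xs.1] else acc.1),
         pvStep1 acc.2 xs.1))
      (acc, pm)).1 = acc ++ pvCanon pm l := by
  induction l generalizing acc pm with
  | nil => simp [pvCanon]
  | cons x t ih =>
      simp only [pvSpecS, List.zip_cons_cons, List.foldl_cons, ih, pvCanon]
      split_ifs <;> simp

theorem pvB_eq_canon (nums : List Int) : findValidElements_alt nums = pvCanon none nums := by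
  unfold findValidElements_alt
  have h1 := pvB_loop1 nums [] none
  simp only [List.nil_append] at h1
  rw [h1, List.reverse_reverse, pvB_loop2, List.nil_append]

-- pyGetD of an append, left part
theorem pvGetD_append_left (pre rest : List Int) (j : Int) (d : Int)
    (h0 : 0 ≤ j) (h : j < (pre.length : Int)) :
    PySem.List.pyGetD (pre ++ rest) j d = PySem.List.pyGetD pre j d := by
  obtain ⟨k, rfl⟩ := Int.eq_ofNat_of_zero_le h0
  rw [PySem.List.pyGetD_natCast, PySem.List.pyGetD_natCast]
  have hk : k < pre.length := by exact_mod_cast h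
  rw [List.getD_eq_getElem?_getD, List.getD_eq_getElem?_getD, List.getElem?_append_left hk]

-- A's first condition at index pre.length of pre ++ x :: t
theorem pvA_cond1 (pre t : List Int) (x : Int) :
    ((PySem.List.pyRange 0 (pre.length : Int) 1).all
      (fun j => decide (PySem.List.pyGetD (pre ++ x :: t) j 0 < x)))
    = pre.all (fun y => decide (y < x)) := by
  have hcongr : ∀ j ∈ PySem.List.pyRange 0 (pre.length : Int) 1,
      decide (PySem.List.pyGetD (pre ++ x :: t) j 0 < x)
      = decide (PySem.List.pyGetD pre j 0 < x) := by
    intro j hj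
    rw [PySem.List.mem_pyRange_one] at hj
    rw [pvGetD_append_left pre (x :: t) j 0 hj.1 hj.2]
  rw [pv_all_congr_mem hcongr]
  conv_rhs => rw [← PySem.List.map_pyGetD_pyRange_zero' pre 0]
  rw [List.all_map]
  rfl

-- A's second condition at index pre.length of pre ++ x :: t
theorem pvA_cond2 (pre t : List Int) (x : Int) :
    ((PySem.List.pyRange ((pre.length : Int) + 1) ((pre ++ x :: t).length : Int) 1).all
      (fun j => decide (PySem.List.pyGetD (pre ++ x :: t) j 0 < x)))
    = t.all (fun y => decide (y < x)) := by
  have h0 : (0 : Int) ≤ (pre.length : Int) + 1 := by positivity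
  have hmap := PySem.List.map_pyGetD_pyRange' (pre ++ x :: t) 0 h0
  have htn : ((pre.length : Int) + 1).toNat = pre.length + 1 := by omega
  rw [htn] at hmap
  have hd : List.drop (pre.length + 1) (pre ++ x :: t) = t := by
    rw [show pre ++ x :: t = (pre ++ [x]) ++ t from by simp,
      show pre.length + 1 = (pre ++ [x]).length from by simp]
    exact List.drop_left
  rw [show ((PySem.List.pyRange ((pre.length : Int) + 1) ((pre ++ x :: t).length : Int) 1).all
      (fun j => decide (PySem.List.pyGetD (pre ++ x :: t) j 0 < x)))
      = (((PySem.List.pyRange ((pre.length : Int) + 1) ((pre ++ x :: t).length : Int) 1).map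
          (fun j => PySem.List.pyGetD (pre ++ x :: t) j 0)).all (fun y => decide (y < x))) from by
      rw [List.all_map]; rfl,
    hmap, hd]

-- A's loop, with the already-processed prefix made explicit
theorem pvA_go (nums : List Int) (pre l : List Int) (acc : List Int) (hn : nums = pre ++ l) :
    ((PySem.List.enumerate l (pre.length : Int)).foldl (fun elems p =>
      if (PySem.List.pyRange 0 p.1 1).all (fun j => decide (PySem.List.pyGetD nums j 0 < p.2)) then
        elems ++ [p.2]
      else if (PySem.List.pyRange (p.1 + 1) (nums.length : Int) 1).all
          (fun j => decide (PySem.List.pyGetD nums j 0 < p.2)) then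
        elems ++ [p.2]
      else elems) acc)
    = acc ++ pvCanon (pvFoldMax none pre) l := by
  induction l generalizing pre acc with
  | nil => simp [pvCanon]
  | cons x t ih =>
      subst hn
      rw [PySem.List.enumerate_cons, List.foldl_cons, pvA_cond1, pvA_cond2]
      have hih := ih (pre ++ [x])
        (acc ++ (if pre.all (fun y => decide (y < x)) || t.all (fun y => decide (y < x))
          then [x] else [])) (by simp)
      clear ih
      have hlen : (((pre ++ [x]).length : Nat) : Int) = (pre.length : Int) + 1 := by simp
      rw [hlen, pvFoldMax_append] at hih
      simp only [pvCanon]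
      rw [pvLtO_foldMax, pvLtO_foldMax]
      simp only [pvLtO, Bool.true_and]
      cases h1 : pre.all (fun y => decide (y < x)) <;>
        cases h2 : t.all (fun y => decide (y < x)) <;>
        simp only [h1, h2, Bool.true_or, Bool.false_or, Bool.or_false, Bool.or_true,
          Bool.false_eq_true, if_true, if_false, List.append_nil, List.append_assoc,
          List.singleton_append, reduceIte] at hih ⊢ <;>
        simpa [List.append_assoc] using hih

theorem pvA_eq_canon (nums : List Int) : findValidElements nums = pvCanon none nums := by
  unfold findValidElements
  have := pvA_go nums [] nums [] (by simp)
  simpa [pvFoldMax] using this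

-- ===== VERDICT (by name: the statement is the Claim_ definition above) =====
theorem findValidElements_spec : Claim_equal_findValidElements := by
  intro nums _
  unfold Spec_findValidElements
  rw [pvA_eq_canon, pvB_eq_canon]
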